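-- pv_equiv track=rewrite | github.com/naniyamali/Book-finder-with-recommendation-using-collaborative-filtering-approach | scripts/recommendation_engine.py | find_book_sequences
-- ===== SOURCE A (Python) =====
-- from typing import Dict, List, Tuple
--
-- def find_book_sequences(
--     user_history: List[Dict],
-- ) -> List[Tuple[str, str]]:
--     """Find sequences of books (book A followed by book B)"""
--     sequences = []
--     for i in range(len(user_history) - 1):
--         current_book = user_history[i]["book_id"]
--         next_book = user_history[i + 1]["book_id"]
--         sequences.append((current_book, next_book))
--     return sequences
-- ===== SOURCE B (Python) =====
-- def find_book_sequences(user_history):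
--     """Find sequences of books (book A followed by book B)"""
--     def chain(hist):
--         if len(hist) < 2:
--             return []
--         pair = (hist[0]["book_id"], hist[1]["book_id"])
--         return [pair] + chain(hist[1:])
--     return chain(user_history)
-- ===== Notes on version B (the rewrite author's own statement) =====
-- stated objective: alternative
-- what changed: Replaces the index-based counting loop with an accumulator by structural recursion on the list: the head pair is emitted and the function recurses on the tail, building the result back-to-front with no range/indexing.
import Mathlib
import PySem

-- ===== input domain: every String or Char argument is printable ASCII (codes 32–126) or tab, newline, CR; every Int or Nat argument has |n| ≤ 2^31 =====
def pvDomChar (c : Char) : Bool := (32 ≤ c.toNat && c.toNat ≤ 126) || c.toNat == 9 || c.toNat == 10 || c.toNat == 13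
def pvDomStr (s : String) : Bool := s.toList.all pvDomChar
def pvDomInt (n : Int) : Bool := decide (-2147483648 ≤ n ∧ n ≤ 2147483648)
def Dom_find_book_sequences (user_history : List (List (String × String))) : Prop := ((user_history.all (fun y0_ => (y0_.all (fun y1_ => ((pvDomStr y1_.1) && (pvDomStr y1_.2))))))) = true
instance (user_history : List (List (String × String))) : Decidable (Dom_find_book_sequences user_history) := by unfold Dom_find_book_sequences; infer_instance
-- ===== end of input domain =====

-- B replaces the index-counting loop with structural recursion on the history list (head pair, then recurse on the tail); same linear cost, different decomposition.

-- ===== PORT A =====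
-- h["book_id"] is a first-match association-list lookup; the `.getD ""` default is never
-- reached under Pre_ (under Pre_ every dict contains the key whenever the loop body runs;
-- in Python a missing key raises KeyError there).
def find_book_sequences (user_history : List (List (String × String))) : List (String × String) :=
  (PySem.List.pyRange 0 ((user_history.length : Int) - 1) 1).foldl
    (fun sequences i =>
      let current_book := ((PySem.List.pyGetD user_history i []).lookup "book_id").getD ""
      let next_book := ((PySem.List.pyGetD user_history (i + 1) []).lookup "book_id").getD ""
      sequences ++ [(current_book, next_book)]) []

-- ===== PORT B =====
-- `chain`: if len(hist) < 2 return []; else emit the head pair and recurse on hist[1:].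
def find_book_sequences_chain : List (List (String × String)) → List (String × String)
  | x :: y :: rest =>
      ((x.lookup "book_id").getD "", (y.lookup "book_id").getD "") ::
        find_book_sequences_chain (y :: rest)
  | _ => []

def find_book_sequences_alt (user_history : List (List (String × String))) : List (String × String) :=
  find_book_sequences_chain user_history

-- ===== PRECONDITION & SPEC =====
-- Pre_ excludes histories of length ≥ 2 containing a dict without the key "book_id":
-- there both A and B raise KeyError (on shorter histories neither ever looks the key up).
def Pre_find_book_sequences (user_history : List (List (String × String))) : Prop :=
  user_history.length ≤ 1 ∨ ∀ h ∈ user_history, (h.lookup "book_id").isSome = true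

instance (user_history : List (List (String × String))) : Decidable (Pre_find_book_sequences user_history) := by
  unfold Pre_find_book_sequences; infer_instance

def pvWitness_find_book_sequences : (List (List (String × String))) :=
  [[("book_id", "b1")], [("book_id", "b2"), ("title", "t")]]

def Spec_find_book_sequences (user_history : List (List (String × String))) (out : List (String × String)) : Prop := out = find_book_sequences_alt user_history
instance (user_history : List (List (String × String))) (out : List (String × String)) : Decidable (Spec_find_book_sequences user_history out) := by unfold Spec_find_book_sequences; infer_instance

-- ===== CLAIM (what is proved, stated in full; the proofs are below) =====
def Claim_equal_find_book_sequences : Prop := ∀ (user_history : List (List (String × String))), Dom_find_book_sequences user_history → Pre_find_book_sequences user_history → Spec_find_book_sequences user_history (find_book_sequences user_history)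

-- ===== LEMMAS AND PROOFS =====

-- The index pairs produced by A's range loop, as a map over the range.
theorem find_book_sequences_eq_map (user_history : List (List (String × String))) :
    find_book_sequences user_history =
      (PySem.List.pyRange 0 ((user_history.length : Int) - 1) 1).map
        (fun i => (((PySem.List.pyGetD user_history i []).lookup "book_id").getD "",
                   ((PySem.List.pyGetD user_history (i + 1) []).lookup "book_id").getD "")) := by
  unfold find_book_sequences
  rw [PySem.List.foldl_append_singleton_eq_map]
  simp

-- A's loop result equals the zip of the projected ids with their tail.
theorem find_book_sequences_eq_zip (user_history : List (List (String × String))) :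
    find_book_sequences user_history =
      (user_history.map (fun h => (h.lookup "book_id").getD "")).zip
        ((user_history.map (fun h => (h.lookup "book_id").getD "")).tail) := by
  rw [find_book_sequences_eq_map]
  apply List.ext_getElem
  · simp [PySem.List.length_pyRange_one]
  · intro k h1 h2
    have hk : k < user_history.length - 1 := by
      simpa [PySem.List.length_pyRange_one] using h1
    have hk1 : k + 1 < user_history.length := by omega
    simp only [List.getElem_map, PySem.List.getElem_pyRange_one, List.getElem_zip,
      List.getElem_tail]
    simp only [zero_add]
    have e2 : ((k : Int) + 1) = (((k + 1 : Nat)) : Int) := by push_cast; ring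
    rw [e2, PySem.List.pyGetD_natCast, PySem.List.pyGetD_natCast]
    simp [List.getD, hk1, Nat.lt_of_lt_of_le hk (Nat.sub_le _ _)]

-- B's recursion also computes that zip.
theorem find_book_sequences_chain_eq_zip (l : List (List (String × String))) :
    find_book_sequences_chain l =
      (l.map (fun h => (h.lookup "book_id").getD "")).zip
        ((l.map (fun h => (h.lookup "book_id").getD "")).tail) := by
  induction l with
  | nil => simp [find_book_sequences_chain]
  | cons x t ih =>
    cases t with
    | nil => simp [find_book_sequences_chain]
    | cons y rest =>
      simp only [find_book_sequences_chain, ih, List.map_cons, List.tail_cons, List.zip_cons_cons]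

-- ===== VERDICT (by name: the statement is the Claim_ definition above) =====
theorem find_book_sequences_spec : Claim_equal_find_book_sequences := by
  intro user_history _ _
  unfold Spec_find_book_sequences find_book_sequences_alt
  rw [find_book_sequences_eq_zip, find_book_sequences_chain_eq_zip]
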